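-- pv_equiv track=rewrite | github.com/Rychek4/Pattern_Project_Public | blog/blog_manager.py | _collect_authors
-- ===== SOURCE A (Python) =====
-- from typing import Any, Dict, List, Optional
--
-- def _collect_authors(posts: List[Dict[str, Any]]) -> Dict[str, List[Dict[str, Any]]]:
--     """Group posts by author. Returns {author_name: [post, ...]}."""
--     authors: Dict[str, List[Dict[str, Any]]] = {}
--     for post in posts:
--         author = post.get("author", "Isaac")
--         if author not in authors:
--             authors[author] = []
--         authors[author].append(post)
--     return dict(sorted(authors.items()))
-- ===== SOURCE B (Python) =====
-- def _collect_authors(posts):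
--     """Group posts by author. Returns {author_name: [post, ...]}."""
--     authors = sorted({post.get("author", "Isaac") for post in posts})
--     return {a: [p for p in posts if p.get("author", "Isaac") == a] for a in authors}
-- ===== Notes on version B (the rewrite author's own statement) =====
-- stated objective: idiomatic
-- what changed: A grows a dict of lists incrementally while iterating posts and then sorts its items; B first collects the distinct author names with a set, sorts them, and builds the result with one filtering comprehension per author.
import Mathlib
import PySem

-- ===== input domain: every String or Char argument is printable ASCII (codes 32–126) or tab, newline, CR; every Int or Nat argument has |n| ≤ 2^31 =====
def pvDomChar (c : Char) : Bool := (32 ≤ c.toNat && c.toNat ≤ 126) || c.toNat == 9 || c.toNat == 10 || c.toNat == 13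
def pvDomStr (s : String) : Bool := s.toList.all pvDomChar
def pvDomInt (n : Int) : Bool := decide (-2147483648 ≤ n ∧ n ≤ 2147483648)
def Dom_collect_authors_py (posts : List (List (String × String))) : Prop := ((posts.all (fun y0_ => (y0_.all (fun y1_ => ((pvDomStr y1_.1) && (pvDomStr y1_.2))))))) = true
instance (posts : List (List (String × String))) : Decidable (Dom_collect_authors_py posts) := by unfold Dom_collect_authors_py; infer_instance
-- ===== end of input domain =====

-- B replaces A's incrementally grown dict-of-lists with the idiomatic "sorted distinct
-- authors, then one filter per author" comprehension; same exact result, no speed claim.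

-- post.get("author", "Isaac")  (shared by both Pythons verbatim)
def pyAuthor (post : List (String × String)) : String :=
  (PySem.Dict.mk post).getD "author" "Isaac"

-- ===== PORT A =====
-- sorted(authors.items()) compares (str, list) tuples; the dict's keys are distinct, so
-- Python's tuple comparison never reaches the second component — sorting by the key
-- (first component) is exact here.
def collect_authors_py (posts : List (List (String × String))) : List (String × List (List (String × String))) :=
  let authors := posts.foldl (fun d post =>
    let author := pyAuthor post
    let d := if d.contains author then d else d.insert author []
    d.modify author [] (· ++ [post])) PySem.Dict.empty
  PySem.List.sorted authors.items (fun p => p.1) false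

-- ===== PORT B =====
def collect_authors_py_alt (posts : List (List (String × String))) : List (String × List (List (String × String))) :=
  let names := PySem.List.sorted (PySem.Set.ofList (posts.map pyAuthor)) (fun x => x) false
  names.map (fun a => (a, posts.filter (fun p => pyAuthor p == a)))

-- ===== PRECONDITION & SPEC =====
def Spec_collect_authors_py (posts : List (List (String × String))) (out : List (String × List (List (String × String)))) : Prop := out = collect_authors_py_alt posts
instance (posts : List (List (String × String))) (out : List (String × List (List (String × String)))) : Decidable (Spec_collect_authors_py posts out) := by unfold Spec_collect_authors_py; infer_instance

-- ===== CLAIM (what is proved, stated in full; the proofs are below) =====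
def Claim_equal_collect_authors_py : Prop := ∀ (posts : List (List (String × String))), Dom_collect_authors_py posts → Spec_collect_authors_py posts (collect_authors_py posts)

-- ===== LEMMAS AND PROOFS =====

-- One iteration of A's loop is a single `modify` with default [].
theorem collect_step_eq (d : PySem.Dict String (List (List (String × String))))
    (post : List (String × String)) :
    (let author := pyAuthor post
     let d := if d.contains author then d else d.insert author []
     d.modify author [] (· ++ [post])) = d.modify (pyAuthor post) [] (· ++ [post]) := by
  by_cases h : d.contains (pyAuthor post) = true
  · simp [h]
  · simp only [Bool.not_eq_true] at h
    simp [h, PySem.Dict.modify, PySem.Dict.insert_insert_self, PySem.Dict.getD_of_not_contains]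

-- A's finished dict, as an items list: one entry per distinct author (first-appearance
-- order), holding exactly the posts with that author in original order.
theorem collect_items_eq (posts : List (List (String × String))) :
    (posts.foldl (fun d p => d.modify (pyAuthor p) [] (· ++ [p])) PySem.Dict.empty).items
      = (PySem.Set.ofList (posts.map pyAuthor)).map
          (fun c => (c, posts.filter (fun p => pyAuthor p == c))) := by
  have hkeys : (posts.foldl (fun d p => d.modify (pyAuthor p) [] (· ++ [p])) PySem.Dict.empty).keys
      = PySem.Set.ofList (posts.map pyAuthor) := by
    rw [PySem.Dict.keys_foldl_modify_key (key := pyAuthor)]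
    simp [PySem.Set.ofList_eq_foldl, PySem.Dict.keys_empty, PySem.Set.update]
  have hnodup : (posts.foldl (fun d p => d.modify (pyAuthor p) [] (· ++ [p])) PySem.Dict.empty).keys.Nodup :=
    PySem.Dict.nodup_keys_foldl_modify_key _ _ _ _ _ (by simp)
  have hget : ∀ c, (posts.foldl (fun d p => d.modify (pyAuthor p) [] (· ++ [p])) PySem.Dict.empty).getD c []
      = posts.filter (fun p => pyAuthor p == c) := by
    intro c
    rw [show posts.foldl (fun d p => d.modify (pyAuthor p) [] (· ++ [p])) PySem.Dict.empty
        = (posts.map (fun p => (pyAuthor p, p))).foldl (fun d q => d.modify q.1 [] (· ++ [q.2])) PySem.Dict.empty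
      from by rw [List.foldl_map]]
    rw [PySem.Dict.getD_foldl_modify_append]
    simp [List.filter_map, Function.comp_def]
  rw [PySem.Dict.items_eq_map_keys _ hnodup [], hkeys]
  exact List.map_congr_left (fun c _ => by rw [hget c])

-- ===== VERDICT (by name: the statement is the Claim_ definition above) =====
theorem collect_authors_py_spec : Claim_equal_collect_authors_py := by
  intro posts _
  unfold Spec_collect_authors_py collect_authors_py collect_authors_py_alt
  have hstep : (posts.foldl (fun d post =>
      let author := pyAuthor post
      let d := if d.contains author then d else d.insert author []
      d.modify author [] (· ++ [post])) PySem.Dict.empty)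
      = posts.foldl (fun d p => d.modify (pyAuthor p) [] (· ++ [p])) PySem.Dict.empty :=
    PySem.List.foldl_congr_mem posts _ _ _ (fun d p _ => collect_step_eq d p)
  simp only at hstep ⊢
  rw [hstep, collect_items_eq]
  apply PySem.List.sorted_eq_of_perm_of_pairwise_lt
  · exact (PySem.List.sorted_perm _ _ _).map _
  · exact List.Pairwise.map _ (fun a b h => h)
      (PySem.List.sorted_ofList_pairwise_lt (posts.map pyAuthor))
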